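-- pv_equiv track=rewrite | github.com/hallucinationChecker/Bibcheck | bibcheck.py | author_overlap
-- ===== SOURCE A (Python) =====
-- def author_overlap(authors, crossref_authors):
--     """Loose surname overlap check (at least one surname matches)."""
--     for a in authors:
--         a = a.lower()
--         for ca in crossref_authors:
--             ca = ca.lower()
--             if a == ca:
--                 return True
--             # fuzzy match: first 4 chars overlap
--             if a.startswith(ca[:4]) or ca.startswith(a[:4]):
--                 return True
--     return False
-- ===== SOURCE B (Python) =====
-- def author_overlap(authors, crossref_authors):
--     """Loose surname overlap check (at least one surname matches)."""
--     # Index the crossref side once: `full` holds each lowercased 4-char key,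
--     # `prefs` holds every prefix of every key.  An author hits iff its own
--     # key is a prefix of some crossref key, or some crossref key is a prefix
--     # of the author's key.
--     full = set()
--     prefs = set()
--     for ca in crossref_authors:
--         key = ca.lower()[:4]
--         full.add(key)
--         for k in range(len(key) + 1):
--             prefs.add(key[:k])
--     for a in authors:
--         key = a.lower()[:4]
--         if key in prefs:
--             return True
--         for k in range(len(key) + 1):
--             if key[:k] in full:
--                 return True
--     return False
-- ===== Notes on version B (the rewrite author's own statement) =====
-- stated objective: alternative
-- what changed: Replaces A's nested pairwise loop over authors x crossref_authors by building, in one pass over crossref_authors, a set of the lowercased 4-char keys and a set of all their prefixes, then scanning each author once against those sets; it trades A's early exit on the first matching pair for an index that avoids the quadratic pairwise scan.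
import Mathlib
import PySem

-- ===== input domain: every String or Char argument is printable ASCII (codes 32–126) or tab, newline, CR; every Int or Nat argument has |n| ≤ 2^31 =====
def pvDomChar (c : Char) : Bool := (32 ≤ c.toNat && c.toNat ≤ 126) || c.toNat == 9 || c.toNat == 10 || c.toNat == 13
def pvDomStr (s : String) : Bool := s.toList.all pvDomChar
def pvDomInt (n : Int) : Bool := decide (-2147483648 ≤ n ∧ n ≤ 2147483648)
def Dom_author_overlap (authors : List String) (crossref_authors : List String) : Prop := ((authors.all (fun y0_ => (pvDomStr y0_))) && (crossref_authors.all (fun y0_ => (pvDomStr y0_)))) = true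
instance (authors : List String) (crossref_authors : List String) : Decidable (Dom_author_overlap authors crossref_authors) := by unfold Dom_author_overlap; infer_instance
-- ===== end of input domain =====

-- B replaces A's nested pairwise scan by a prefix index built in one pass over the crossref side
-- (the lowercased 4-char keys and all their prefixes, as sets), then a single scan of the authors.

-- ===== PORT A =====
def pvAInner (a : String) : List String → Bool
  | [] => false
  | ca :: rest =>
    let cal := PySem.Str.lower ca
    if a == cal then true
    else if PySem.Str.startswith a (PySem.Str.slice cal none (some 4))
         || PySem.Str.startswith cal (PySem.Str.slice a none (some 4)) then true
    else pvAInner a rest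

def pvAOuter (crossref_authors : List String) : List String → Bool
  | [] => false
  | a :: rest =>
    let al := PySem.Str.lower a
    if pvAInner al crossref_authors then true else pvAOuter crossref_authors rest

def author_overlap (authors : List String) (crossref_authors : List String) : Bool :=
  pvAOuter crossref_authors authors

-- ===== PORT B =====
def pvKey (s : String) : String := PySem.Str.slice (PySem.Str.lower s) none (some 4)

def pvIndex : List String → PySem.Set String × PySem.Set String → PySem.Set String × PySem.Set String
  | [], acc => acc
  | ca :: rest, (full, prefs) =>
    let key := pvKey ca
    pvIndex rest (full.add key,
      (PySem.List.pyRange 0 (PySem.Str.len key + 1) 1).foldl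
        (fun p k => p.add (PySem.Str.slice key none (some k))) prefs)

def pvScan (full prefs : PySem.Set String) : List String → Bool
  | [] => false
  | a :: rest =>
    let key := pvKey a
    if prefs.contains key then true
    else if (PySem.List.pyRange 0 (PySem.Str.len key + 1) 1).any
              (fun k => full.contains (PySem.Str.slice key none (some k))) then true
    else pvScan full prefs rest

def author_overlap_alt (authors : List String) (crossref_authors : List String) : Bool :=
  let fp := pvIndex crossref_authors (PySem.Set.empty, PySem.Set.empty)
  pvScan fp.1 fp.2 authors

-- ===== PRECONDITION & SPEC =====
def Spec_author_overlap (authors : List String) (crossref_authors : List String) (out : Bool) : Prop := out = author_overlap_alt authors crossref_authors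
instance (authors : List String) (crossref_authors : List String) (out : Bool) : Decidable (Spec_author_overlap authors crossref_authors out) := by unfold Spec_author_overlap; infer_instance

-- ===== CLAIM (what is proved, stated in full; the proofs are below) =====
def Claim_equal_author_overlap : Prop := ∀ (authors : List String) (crossref_authors : List String), Dom_author_overlap authors crossref_authors → Spec_author_overlap authors crossref_authors (author_overlap authors crossref_authors)

-- ===== LEMMAS AND PROOFS =====

-- the lowered 4-char key, on the list-of-chars side
def pvKeyL (s : String) : List Char := (PySem.Chars.lower s.toList).take 4

lemma pvToList_sliceTo (s : String) (k : Int) (hk : 0 ≤ k) :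
    (PySem.Str.slice s none (some k)).toList = s.toList.take k.toNat := by
  rw [PySem.Str.toList_slice, PySem.Chars.slice_eq_listSlice, PySem.List.slice_to _ hk]

lemma pvToList_pvKey (s : String) : (pvKey s).toList = pvKeyL s := by
  rw [pvKey, pvKeyL, pvToList_sliceTo _ _ (by norm_num), PySem.Str.toList_lower]
  rfl

lemma pvKeyL_eq (a : String) : (PySem.Str.lower a).toList.take 4 = pvKeyL a := by
  rw [PySem.Str.toList_lower]; rfl

lemma pvPrefix_take4 (p l : List Char) (hp : p.length ≤ 4) : p <+: l.take 4 ↔ p <+: l := by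
  rw [List.prefix_take_iff]; tauto

-- one pairwise test of A, in terms of the two keys (a is already lowered on A's side,
-- so its key appears as a.toList.take 4 here)
lemma pvCond_iff (a ca : String) :
    ((a == PySem.Str.lower ca) = true
      ∨ (PySem.Str.startswith a (PySem.Str.slice (PySem.Str.lower ca) none (some 4))
          || PySem.Str.startswith (PySem.Str.lower ca) (PySem.Str.slice a none (some 4))) = true)
    ↔ (pvKeyL ca <+: a.toList.take 4 ∨ a.toList.take 4 <+: pvKeyL ca) := by
  have h1 : pvKeyL ca <+: a.toList.take 4 ↔ pvKeyL ca <+: a.toList :=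
    pvPrefix_take4 _ _ (by simp [pvKeyL])
  have h2 : a.toList.take 4 <+: pvKeyL ca ↔ a.toList.take 4 <+: PySem.Chars.lower ca.toList :=
    pvPrefix_take4 _ _ (List.length_take_le 4 a.toList)
  rw [h1, h2]
  simp only [Bool.or_eq_true, beq_iff_eq, PySem.Str.startswith_eq, PySem.Chars.startswith_iff,
    pvToList_sliceTo _ _ (by norm_num : (0:Int) ≤ 4), PySem.Str.toList_lower]
  constructor
  · rintro (h | h | h)
    · left
      subst h
      simpa [pvKeyL, ← PySem.Str.toList_lower] using List.take_prefix 4 (PySem.Str.lower ca).toList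
    · left; simpa [pvKeyL] using h
    · right; simpa using h
  · rintro (h | h)
    · right; left; simpa [pvKeyL] using h
    · right; right; simpa using h

lemma pvAInner_iff (a : String) (cs : List String) :
    pvAInner a cs = true ↔
      ∃ ca ∈ cs, (pvKeyL ca <+: a.toList.take 4 ∨ a.toList.take 4 <+: pvKeyL ca) := by
  induction cs with
  | nil => simp [pvAInner]
  | cons ca rest ih =>
    have hstep : pvAInner a (ca :: rest) = true ↔
        (((a == PySem.Str.lower ca) = true
          ∨ (PySem.Str.startswith a (PySem.Str.slice (PySem.Str.lower ca) none (some 4))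
              || PySem.Str.startswith (PySem.Str.lower ca) (PySem.Str.slice a none (some 4))) = true)
         ∨ pvAInner a rest = true) := by
      simp only [pvAInner]
      split_ifs with hh1 hh2
      · exact iff_of_true rfl (Or.inl (Or.inl hh1))
      · exact iff_of_true rfl (Or.inl (Or.inr hh2))
      · exact ⟨fun h => Or.inr h, fun h => h.resolve_left (fun hc => hc.elim hh1 hh2)⟩
    rw [hstep, pvCond_iff, ih]
    simp only [List.mem_cons, exists_eq_or_imp]

lemma pvA_iff (as cs : List String) :
    author_overlap as cs = true ↔
      ∃ a ∈ as, ∃ ca ∈ cs, (pvKeyL ca <+: pvKeyL a ∨ pvKeyL a <+: pvKeyL ca) := by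
  induction as with
  | nil => simp [author_overlap, pvAOuter]
  | cons a rest ih =>
    have hstep : author_overlap (a :: rest) cs = true ↔
        (pvAInner (PySem.Str.lower a) cs = true ∨ author_overlap rest cs = true) := by
      simp only [author_overlap, pvAOuter]
      split_ifs with hh
      · exact iff_of_true rfl (Or.inl hh)
      · exact ⟨fun h => Or.inr h, fun h => h.resolve_left hh⟩
    rw [hstep, pvAInner_iff, ih]
    simp only [pvKeyL_eq, List.mem_cons, exists_eq_or_imp]

lemma pvMem_foldl_add (xs : List Int) (g : Int → String) (p : PySem.Set String) (x : String) :
    x ∈ xs.foldl (fun s k => s.add (g k)) p ↔ x ∈ p ∨ ∃ k ∈ xs, x = g k := by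
  induction xs generalizing p with
  | nil => simp
  | cons k rest ih =>
    simp only [List.foldl_cons, ih, PySem.Set.mem_add, List.mem_cons]
    constructor
    · rintro ((h | h) | ⟨j, hj, hx⟩)
      · exact Or.inl h
      · exact Or.inr ⟨k, Or.inl rfl, h⟩
      · exact Or.inr ⟨j, Or.inr hj, hx⟩
    · rintro (h | ⟨j, (rfl | hj), hx⟩)
      · exact Or.inl (Or.inl h)
      · exact Or.inl (Or.inr hx)
      · exact Or.inr ⟨j, hj, hx⟩

lemma pvIndex_fst_mem (cs : List String) (f p : PySem.Set String) (x : String) :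
    x ∈ (pvIndex cs (f, p)).1 ↔ x ∈ f ∨ ∃ ca ∈ cs, x = pvKey ca := by
  induction cs generalizing f p with
  | nil => simp [pvIndex]
  | cons ca rest ih =>
    rw [show pvIndex (ca :: rest) (f, p) = pvIndex rest
        (f.add (pvKey ca),
         (PySem.List.pyRange 0 (PySem.Str.len (pvKey ca) + 1) 1).foldl
           (fun p k => p.add (PySem.Str.slice (pvKey ca) none (some k))) p) from rfl, ih]
    simp only [PySem.Set.mem_add, List.mem_cons]
    constructor
    · rintro ((h | h) | ⟨y, hy, hx⟩)
      · exact Or.inl h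
      · exact Or.inr ⟨ca, Or.inl rfl, h⟩
      · exact Or.inr ⟨y, Or.inr hy, hx⟩
    · rintro (h | ⟨y, (rfl | hy), hx⟩)
      · exact Or.inl (Or.inl h)
      · exact Or.inl (Or.inr hx)
      · exact Or.inr ⟨y, hy, hx⟩

lemma pvIndex_snd_mem (cs : List String) (f p : PySem.Set String) (x : String) :
    x ∈ (pvIndex cs (f, p)).2 ↔
      x ∈ p ∨ ∃ ca ∈ cs, ∃ k ∈ PySem.List.pyRange 0 (PySem.Str.len (pvKey ca) + 1) 1,
        x = PySem.Str.slice (pvKey ca) none (some k) := by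
  induction cs generalizing f p with
  | nil =>
    constructor
    · exact fun h => Or.inl h
    · rintro (h | ⟨ca, hca, -⟩)
      · exact h
      · cases hca
  | cons ca rest ih =>
    rw [show pvIndex (ca :: rest) (f, p) = pvIndex rest
        (f.add (pvKey ca),
         (PySem.List.pyRange 0 (PySem.Str.len (pvKey ca) + 1) 1).foldl
           (fun p k => p.add (PySem.Str.slice (pvKey ca) none (some k))) p) from rfl, ih]
    simp only [pvMem_foldl_add, List.mem_cons]
    constructor
    · rintro ((h | ⟨k, hk, hx⟩) | ⟨y, hy, hrest⟩)
      · exact Or.inl h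
      · exact Or.inr ⟨ca, Or.inl rfl, k, hk, hx⟩
      · exact Or.inr ⟨y, Or.inr hy, hrest⟩
    · rintro (h | ⟨y, (rfl | hy), hrest⟩)
      · exact Or.inl (Or.inl h)
      · exact Or.inl (Or.inr hrest)
      · exact Or.inr ⟨y, hy, hrest⟩

-- the k-indexed slices of `key` appearing in B are exactly the prefixes of `key`
lemma pvExists_slice_eq_iff (key x : String) :
    (∃ k ∈ PySem.List.pyRange 0 (PySem.Str.len key + 1) 1,
        x = PySem.Str.slice key none (some k)) ↔ x.toList <+: key.toList := by
  constructor
  · rintro ⟨k, hk, rfl⟩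
    obtain ⟨hk0, _⟩ := (PySem.List.mem_pyRange_one).mp hk
    rw [pvToList_sliceTo _ _ hk0]
    exact List.take_prefix _ _
  · intro h
    refine ⟨(x.toList.length : Int), ?_, ?_⟩
    · rw [PySem.List.mem_pyRange_one, PySem.Str.len_eq]
      have := h.length_le
      omega
    · apply String.toList_inj.mp
      rw [pvToList_sliceTo _ _ (Int.natCast_nonneg _)]
      simpa using List.prefix_iff_eq_take.mp h

lemma pvB_iff (as cs : List String) :
    author_overlap_alt as cs = true ↔
      ∃ a ∈ as, ∃ ca ∈ cs, (pvKeyL ca <+: pvKeyL a ∨ pvKeyL a <+: pvKeyL ca) := by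
  have hempty : ∀ y : String, y ∈ (PySem.Set.empty : PySem.Set String) → False := by
    intro y hy; simp [PySem.Set.empty] at hy
  have hc1 : ∀ a : String,
      ((pvIndex cs (PySem.Set.empty, PySem.Set.empty)).2.contains (pvKey a) = true
        ↔ ∃ ca ∈ cs, pvKeyL a <+: pvKeyL ca) := by
    intro a
    rw [PySem.Set.contains_iff, pvIndex_snd_mem]
    constructor
    · rintro (h | ⟨ca, hca, hsl⟩)
      · exact absurd h (hempty _)
      · refine ⟨ca, hca, ?_⟩
        rw [← pvToList_pvKey, ← pvToList_pvKey]
        exact (pvExists_slice_eq_iff _ _).mp hsl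
    · rintro ⟨ca, hca, hpre⟩
      exact Or.inr ⟨ca, hca, (pvExists_slice_eq_iff _ _).mpr
        (by rw [pvToList_pvKey, pvToList_pvKey]; exact hpre)⟩
  have hc2 : ∀ a : String,
      (((PySem.List.pyRange 0 (PySem.Str.len (pvKey a) + 1) 1).any
          (fun k => (pvIndex cs (PySem.Set.empty, PySem.Set.empty)).1.contains
            (PySem.Str.slice (pvKey a) none (some k))) = true)
        ↔ ∃ ca ∈ cs, pvKeyL ca <+: pvKeyL a) := by
    intro a
    rw [List.any_eq_true]
    constructor
    · rintro ⟨k, hk, hcon⟩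
      rw [PySem.Set.contains_iff, pvIndex_fst_mem] at hcon
      rcases hcon with h | ⟨ca, hca, heq⟩
      · exact absurd h (hempty _)
      · refine ⟨ca, hca, ?_⟩
        rw [← pvToList_pvKey, ← pvToList_pvKey]
        exact (pvExists_slice_eq_iff (pvKey a) (pvKey ca)).mp ⟨k, hk, heq.symm⟩
    · rintro ⟨ca, hca, hpre⟩
      obtain ⟨k, hk, heq⟩ := (pvExists_slice_eq_iff (pvKey a) (pvKey ca)).mpr
        (by rw [pvToList_pvKey, pvToList_pvKey]; exact hpre)
      exact ⟨k, hk, by rw [PySem.Set.contains_iff, pvIndex_fst_mem]; exact Or.inr ⟨ca, hca, heq.symm⟩⟩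
  show pvScan _ _ as = true ↔ _
  induction as with
  | nil => exact iff_of_false (by simp [pvScan]) (by rintro ⟨a, ha, -⟩; cases ha)
  | cons a rest ih =>
    have hstep : pvScan (pvIndex cs (PySem.Set.empty, PySem.Set.empty)).1
        (pvIndex cs (PySem.Set.empty, PySem.Set.empty)).2 (a :: rest) = true ↔
        ((pvIndex cs (PySem.Set.empty, PySem.Set.empty)).2.contains (pvKey a) = true
         ∨ ((PySem.List.pyRange 0 (PySem.Str.len (pvKey a) + 1) 1).any
            (fun k => (pvIndex cs (PySem.Set.empty, PySem.Set.empty)).1.contains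
              (PySem.Str.slice (pvKey a) none (some k))) = true)
         ∨ pvScan (pvIndex cs (PySem.Set.empty, PySem.Set.empty)).1
             (pvIndex cs (PySem.Set.empty, PySem.Set.empty)).2 rest = true) := by
      simp only [pvScan]
      split_ifs with hh1 hh2
      · exact iff_of_true rfl (Or.inl hh1)
      · exact iff_of_true rfl (Or.inr (Or.inl hh2))
      · exact ⟨fun h => Or.inr (Or.inr h), fun h => (h.resolve_left hh1).resolve_left hh2⟩
    rw [hstep, hc1, hc2, ih]
    simp only [List.mem_cons, exists_eq_or_imp]
    constructor
    · rintro (⟨ca, hca, hp⟩ | ⟨ca, hca, hp⟩ | h)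
      · exact Or.inl ⟨ca, hca, Or.inr hp⟩
      · exact Or.inl ⟨ca, hca, Or.inl hp⟩
      · exact Or.inr h
    · rintro (⟨ca, hca, hp | hp⟩ | h)
      · exact Or.inr (Or.inl ⟨ca, hca, hp⟩)
      · exact Or.inl ⟨ca, hca, hp⟩
      · exact Or.inr (Or.inr h)

-- ===== VERDICT (by name: the statement is the Claim_ definition above) =====
theorem author_overlap_spec : Claim_equal_author_overlap := by
  intro as cs _
  unfold Spec_author_overlap
  rw [Bool.eq_iff_iff, pvA_iff, pvB_iff]
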